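-- pv_equiv track=rewrite | github.com/twmcdunn/set_multiplication_factors | main.py | normal_order
-- ===== SOURCE A (Python) =====
-- def normal_order(set):
--     bestOrds = get_all_rotations(set)
--     while True:
--         for interval in range(len(set)):
--             best = 1000 # dummy value
--             for s in bestOrds:
--                 i = s[len(set) - 1 - interval] - s[0]
--                 if i < 0:
--                     i += 12
--                 best = min(best, i)
--             bestOrdsNarrowed = []
--             for s in bestOrds:
--                 i = s[len(set) - 1 - interval] - s[0]
--                 if i < 0:
--                     i += 12
--                 if i == best and s not in bestOrdsNarrowed:#not really necessary anymore since rotations takes out transpositionally symmetrical redundancies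
--                     bestOrdsNarrowed.append(s)
--             bestOrds = bestOrdsNarrowed
--         if len(bestOrds) == 1:
--             return bestOrds[0]
--
-- def transToZero(set):
--     transSet = []
--     for i in range(len(set)):
--         transSet.append((set[i] + 12 - set[0]) % 12)
--     return transSet
--
-- def get_all_rotations(set):
--     rotations = []
--     for first in range(len(set)):
--         rot = []
--         for i in range(len(set)):
--             rot.append(set[(first + i) % len(set)])
--         rot = transToZero(rot)
--         if rot not in rotations:
--             rotations.append(rot)
--     return rotations
-- ===== SOURCE B (Python) =====
-- def normal_order(set):
--     # Build all rotations transposed to start at 0, then pick the normal order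
--     # directly: the rotation whose reversed interval list is lexicographically
--     # smallest (the same outside-in criterion A narrows down to step by step).
--     n = len(set)
--     rots = [[(set[(f + i) % n] - set[f]) % 12 for i in range(n)] for f in range(n)]
--     return min(rots, key=lambda r: r[::-1])
-- ===== Notes on version B (the rewrite author's own statement) =====
-- stated objective: simpler
-- what changed: Replaces A's while-True interval-by-interval narrowing of the candidate set (repeated min-and-filter scans plus a dedup membership check) by a single min over the zero-transposed rotations keyed by the reversed list, which expresses the same outside-in lexicographic criterion in one comparison pass.
import Mathlib
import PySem

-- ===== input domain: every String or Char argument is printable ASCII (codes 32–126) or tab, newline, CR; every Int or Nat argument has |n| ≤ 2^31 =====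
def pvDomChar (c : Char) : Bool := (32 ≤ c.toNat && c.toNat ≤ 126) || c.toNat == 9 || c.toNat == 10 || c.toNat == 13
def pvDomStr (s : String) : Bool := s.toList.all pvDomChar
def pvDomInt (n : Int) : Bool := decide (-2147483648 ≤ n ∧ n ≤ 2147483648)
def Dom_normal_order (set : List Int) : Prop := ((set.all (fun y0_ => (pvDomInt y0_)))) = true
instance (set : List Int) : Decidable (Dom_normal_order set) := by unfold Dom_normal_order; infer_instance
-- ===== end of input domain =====

-- B replaces A's while-True interval-by-interval narrowing by a single min keyed by the
-- reversed rotation (objective: simpler). Proved equal on all nonempty inputs (Pre_).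

-- ===== PORT A =====
def transToZero (s : List Int) : List Int :=
  (PySem.List.pyRange 0 (PySem.List.len s) 1).foldl
    (fun acc i =>
      acc ++ [PySem.Int.mod (PySem.List.pyGetD s i 0 + 12 - PySem.List.pyGetD s 0 0) 12]) []

def get_all_rotations (s : List Int) : List (List Int) :=
  (PySem.List.pyRange 0 (PySem.List.len s) 1).foldl (fun rotations first =>
    let rot := (PySem.List.pyRange 0 (PySem.List.len s) 1).foldl
      (fun acc i =>
        acc ++ [PySem.List.pyGetD s (PySem.Int.mod (first + i) (PySem.List.len s)) 0]) []
    let rot2 := transToZero rot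
    if rot2 ∈ rotations then rotations else rotations ++ [rot2]) []

-- one iteration of A's `for interval in range(len(set))` body
def narrowOnce (n : Int) (bestOrds : List (List Int)) (interval : Int) : List (List Int) :=
  let best := bestOrds.foldl (fun best s =>
    let i := PySem.List.pyGetD s (n - 1 - interval) 0 - PySem.List.pyGetD s 0 0
    let i := if i < 0 then i + 12 else i
    min best i) 1000
  bestOrds.foldl (fun acc s =>
    let i := PySem.List.pyGetD s (n - 1 - interval) 0 - PySem.List.pyGetD s 0 0
    let i := if i < 0 then i + 12 else i
    if i = best ∧ s ∉ acc then acc ++ [s] else acc) []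

-- A's `while True:` loop, with fuel. On every nonempty input one full pass over the
-- intervals already leaves exactly one candidate (proved below), so fuel 1 is faithful
-- there; on [] Python loops forever (excluded by Pre_normal_order) and we return [].
def whileTrue : Nat → Int → List (List Int) → List Int
  | 0, _, _ => []
  | fuel+1, n, bestOrds =>
    let bo := (PySem.List.pyRange 0 n 1).foldl (narrowOnce n) bestOrds
    if PySem.List.len bo = 1 then PySem.List.pyGetD bo 0 [] else whileTrue fuel n bo

def normal_order (set : List Int) : List Int :=
  whileTrue 1 (PySem.List.len set) (get_all_rotations set)

-- ===== PORT B =====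
def normal_order_alt (set : List Int) : List Int :=
  let n := PySem.List.len set
  let rots := (PySem.List.pyRange 0 n 1).map (fun f =>
    (PySem.List.pyRange 0 n 1).map (fun i =>
      PySem.Int.mod
        (PySem.List.pyGetD set (PySem.Int.mod (f + i) n) 0 - PySem.List.pyGetD set f 0) 12))
  -- r[::-1] is r.reverse (PySem.List.slice?_none_none_neg_one);
  -- min([]) raises ValueError — [] is excluded by Pre_normal_order, .getD [] is a dummy
  (PySem.List.min? rots (fun r => r.reverse)).getD []

-- ===== PRECONDITION & SPEC =====
-- Pre_ excludes only the empty list, on which A's `while True` loop never terminates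
-- (A returns no value there; B raises ValueError).
def Pre_normal_order (set : List Int) : Prop := set ≠ []
instance (set : List Int) : Decidable (Pre_normal_order set) := by
  unfold Pre_normal_order; infer_instance
def pvWitness_normal_order : List Int := ([0, 4, 7] : List Int)

def Spec_normal_order (set : List Int) (out : List Int) : Prop := out = normal_order_alt set
instance (set : List Int) (out : List Int) : Decidable (Spec_normal_order set out) := by
  unfold Spec_normal_order; infer_instance

-- ===== CLAIM (what is proved, stated in full; the proofs are below) =====
def Claim_equal_normal_order : Prop :=
  ∀ (set : List Int), Dom_normal_order set → Pre_normal_order set →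
    Spec_normal_order set (normal_order set)

-- ===== LEMMAS AND PROOFS =====

-- the f-th candidate rotation, as B builds it
def rotF (set : List Int) (f : Int) : List Int :=
  (PySem.List.pyRange 0 (PySem.List.len set) 1).map (fun i =>
    PySem.Int.mod
      (PySem.List.pyGetD set (PySem.Int.mod (f + i) (PySem.List.len set)) 0 -
       PySem.List.pyGetD set f 0) 12)

def rotsB (set : List Int) : List (List Int) :=
  (PySem.List.pyRange 0 (PySem.List.len set) 1).map (rotF set)

-- the i-value A computes for a candidate s at a given interval
def ivfun (n interval : Int) (s : List Int) : Int :=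
  let i := PySem.List.pyGetD s (n - 1 - interval) 0 - PySem.List.pyGetD s 0 0
  if i < 0 then i + 12 else i

lemma narrowOnce_def (n : Int) (L : List (List Int)) (interval : Int) :
    narrowOnce n L interval =
      (L.foldl (fun acc s =>
        if ivfun n interval s = L.foldl (fun b s => min b (ivfun n interval s)) 1000 ∧ s ∉ acc
        then acc ++ [s] else acc) []) := rfl

lemma length_rotF (set : List Int) (f : Int) : (rotF set f).length = set.length := by
  simp [rotF, PySem.List.length_pyRange_one]

lemma rotF_entry_bounds (set : List Int) (f : Int) (x : Int) (hx : x ∈ rotF set f) :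
    0 ≤ x ∧ x < 12 := by
  simp only [rotF, List.mem_map] at hx
  obtain ⟨i, _, rfl⟩ := hx
  exact ⟨PySem.Int.mod_nonneg _ (by omega), PySem.Int.mod_lt _ (by omega)⟩

lemma rotF_head (set : List Int) (f : Int) (h0 : 0 ≤ f) (h1 : f < (set.length : Int))
    (hn : 0 < set.length) :
    (rotF set f)[0]'(by rw [length_rotF]; exact hn) = 0 := by
  have hlen : (0:Nat) < (PySem.List.pyRange 0 (PySem.List.len set) 1).length := by
    simp [PySem.List.length_pyRange_one]; omega
  simp only [rotF, List.getElem_map, PySem.List.getElem_pyRange_one _ _ 0 hlen]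
  have : PySem.Int.mod (f + (0 + ((0:Nat):Int))) (PySem.List.len set) = f := by
    rw [PySem.List.len_eq, PySem.Int.mod_eq_emod_of_pos (by omega)]
    rw [show f + (0 + ((0:Nat):Int)) = f by push_cast; ring]
    exact Int.emod_eq_of_lt h0 h1
  rw [this]
  rw [PySem.Int.mod_eq_emod_of_pos (by omega : (0:Int) < 12)]
  simp

lemma transToZero_eq (s : List Int) :
    transToZero s = s.map (fun x => PySem.Int.mod (x + 12 - PySem.List.pyGetD s 0 0) 12) := by
  unfold transToZero
  rw [PySem.List.foldl_append_singleton_eq_map]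
  rw [show (fun i => PySem.Int.mod (PySem.List.pyGetD s i 0 + 12 - PySem.List.pyGetD s 0 0) 12)
      = (fun x => PySem.Int.mod (x + 12 - PySem.List.pyGetD s 0 0) 12) ∘ (fun i => PySem.List.pyGetD s i 0)
      from rfl]
  rw [← List.map_map, PySem.List.map_pyGetD_pyRange_zero]
  simp

-- A's rotation list = first-occurrence dedup fold of B's rotation list
lemma get_all_rotations_eq (set : List Int) :
    get_all_rotations set =
      (rotsB set).foldl (fun acc r => if r ∈ acc then acc else acc ++ [r]) [] := by
  unfold get_all_rotations rotsB
  rw [List.foldl_map]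
  apply PySem.List.foldl_congr_mem
  intro acc f hf
  rw [PySem.List.mem_pyRange_one] at hf
  simp only [PySem.List.len_eq] at hf
  have hlen : (0:Int) < (set.length : Int) := by omega
  rw [PySem.List.foldl_append_singleton_eq_map]
  set g : Int → Int := fun i => PySem.List.pyGetD set (PySem.Int.mod (f + i) (PySem.List.len set)) 0 with hg
  have hrot2 : transToZero ((PySem.List.pyRange 0 (PySem.List.len set) 1).map g) = rotF set f := by
    rw [transToZero_eq, List.map_map]
    have hc : PySem.List.pyGetD ((PySem.List.pyRange 0 (PySem.List.len set) 1).map g) 0 0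
        = PySem.List.pyGetD set f 0 := by
      rw [PySem.List.pyGetD_map_pyRange_of_nonneg g (PySem.List.len set) 0 0 le_rfl (by simpa using hlen)]
      simp only [hg, PySem.List.len_eq]
      congr 1
      rw [PySem.Int.mod_eq_emod_of_pos hlen, show f + 0 = f by ring]
      exact Int.emod_eq_of_lt hf.1 hf.2
    rw [hc]
    unfold rotF
    apply List.map_congr_left
    intro i _
    simp only [Function.comp, hg, PySem.List.len_eq]
    rw [PySem.Int.mod_eq_emod_of_pos (by omega : (0:Int) < 12),
        PySem.Int.mod_eq_emod_of_pos (by omega : (0:Int) < 12)]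
    omega
  show (if transToZero (List.map g (PySem.List.pyRange 0 (PySem.List.len set))) ∈ acc then acc
    else acc ++ [transToZero (List.map g (PySem.List.pyRange 0 (PySem.List.len set)))]) = _
  rw [hrot2]

lemma mem_dedupFold (l : List (List Int)) (acc : List (List Int)) (x : List Int) :
    x ∈ l.foldl (fun acc r => if r ∈ acc then acc else acc ++ [r]) acc ↔ x ∈ acc ∨ x ∈ l := by
  induction l generalizing acc with
  | nil => simp
  | cons y t ih =>
      simp only [List.foldl_cons]
      by_cases h : y ∈ acc
      · simp [h, ih]
        constructor
        · rintro (h1 | h1) <;> tauto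
        · rintro (h1 | rfl | h1) <;> tauto
      · simp [h, ih, List.mem_append]
        constructor
        · rintro ((h1 | rfl) | h1) <;> tauto
        · rintro (h1 | rfl | h1) <;> tauto

lemma nodup_dedupFold (l : List (List Int)) (acc : List (List Int))
    (h : acc.Nodup) :
    (l.foldl (fun acc r => if r ∈ acc then acc else acc ++ [r]) acc).Nodup := by
  induction l generalizing acc with
  | nil => simpa
  | cons y t ih =>
      simp only [List.foldl_cons]
      by_cases hy : y ∈ acc
      · simp only [hy, if_true]; exact ih acc h
      · simp only [hy, if_false]
        exact ih _ (by simp [List.nodup_append, h]; exact fun a ha => fun e => hy (e ▸ ha))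

-- the i-value A computes for candidate s at interval k equals s.reverse[k]
lemma ival_eq (s : List Int) (k : Nat) (hk : k < s.length)
    (h0 : s[0]'(Nat.lt_of_le_of_lt (Nat.zero_le k) hk) = 0)
    (hb : ∀ x ∈ s, 0 ≤ x ∧ x < 12) :
    ivfun (s.length : Int) (k : Int) s = s.reverse[k]'(by simpa using hk) := by
  unfold ivfun
  have hidx : PySem.List.pyGetD s ((s.length : Int) - 1 - k) 0 = s[s.length - 1 - k]'(by omega) := by
    rw [PySem.List.pyGetD_eq_getElem s 0 (by omega) (by omega)]
    congr 1
    omega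
  have h0' : PySem.List.pyGetD s 0 0 = 0 := by
    rw [PySem.List.pyGetD_eq_getElem s 0 (by omega) (by omega)]
    simpa using h0
  have hbk := hb (s[s.length - 1 - k]'(by omega)) (List.getElem_mem _)
  simp only [hidx, h0', List.getElem_reverse]
  rw [if_neg (by omega)]
  omega

-- lexicographic facts on List Int
lemma lex_lt_of_take_eq {a b : List Int} {k : Nat} (hka : k < a.length) (hkb : k < b.length)
    (ht : a.take k = b.take k) (hlt : b[k] < a[k]) : b < a := by
  show List.lt b a
  rw [List.lt_iff_lex_lt]
  induction k generalizing a b with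
  | zero =>
      cases a with
      | nil => simp at hka
      | cons x a' =>
        cases b with
        | nil => simp at hkb
        | cons y b' => exact List.Lex.rel (by simpa using hlt)
  | succ k ih =>
      cases a with
      | nil => simp at hka
      | cons x a' =>
        cases b with
        | nil => simp at hkb
        | cons y b' =>
          have hxy : x = y ∧ a'.take k = b'.take k := by
            have := ht
            simp [List.take_succ_cons] at this
            exact ⟨this.1, this.2⟩
          rcases hxy with ⟨rfl, ht'⟩
          exact List.Lex.cons (ih (by simpa using hka) (by simpa using hkb) ht' (by simpa using hlt))

lemma getElem_le_of_le {a b : List Int} {k : Nat} (hka : k < a.length) (hkb : k < b.length)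
    (ht : a.take k = b.take k) (hle : a ≤ b) : a[k] ≤ b[k] := by
  by_contra h
  exact absurd (lex_lt_of_take_eq hka hkb ht (lt_of_not_ge h)) (not_lt_of_ge hle)

-- the dedup-guarded append loop over a Nodup list is a plain filter
lemma filtFold (q : List Int → Prop) [DecidablePred q]
    (L acc : List (List Int)) (hnd : L.Nodup) (hdisj : ∀ s ∈ L, s ∉ acc) :
    L.foldl (fun acc s => if q s ∧ s ∉ acc then acc ++ [s] else acc) acc =
      acc ++ L.filter (fun s => decide (q s)) := by
  induction L generalizing acc with
  | nil => simp
  | cons y t ih =>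
      rcases List.nodup_cons.mp hnd with ⟨hy, hnd'⟩
      simp only [List.foldl_cons, List.filter_cons]
      by_cases hq : q y
      · have : (q y ∧ y ∉ acc) := ⟨hq, hdisj y (by simp)⟩
        rw [if_pos this]
        rw [ih (acc ++ [y]) hnd' ?_]
        · simp [hq]
        · intro s hs
          simp only [List.mem_append, List.mem_singleton]
          rintro (h | rfl)
          · exact hdisj s (by simp [hs]) h
          · exact hy hs
      · rw [if_neg (by tauto)]
        rw [ih acc hnd' (fun s hs => hdisj s (by simp [hs]))]
        simp [hq]

-- membership facts for every rotation in rotsB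
lemma length_of_mem_rotsB (set r : List Int) (hr : r ∈ rotsB set) :
    r.length = set.length := by
  simp only [rotsB, List.mem_map] at hr
  obtain ⟨f, _, rfl⟩ := hr
  exact length_rotF set f

lemma head_of_mem_rotsB (set r : List Int) (hr : r ∈ rotsB set) (hn : 0 < set.length) :
    r[0]'(by rw [length_of_mem_rotsB set r hr]; exact hn) = 0 := by
  simp only [rotsB, List.mem_map] at hr
  obtain ⟨f, hf, rfl⟩ := hr
  rw [PySem.List.mem_pyRange_one] at hf
  simp only [PySem.List.len_eq] at hf
  exact rotF_head set f hf.1 hf.2 hn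

lemma bounds_of_mem_rotsB (set r : List Int) (hr : r ∈ rotsB set) :
    ∀ x ∈ r, 0 ≤ x ∧ x < 12 := by
  simp only [rotsB, List.mem_map] at hr
  obtain ⟨f, _, rfl⟩ := hr
  exact rotF_entry_bounds set f

-- PySem.List.min? compares with core's List.lt; Mathlib's LinearOrder on lists compares
-- with List.Lex — logically the same relation (List.lt_iff_lex_lt), so min? agrees
lemma min?_toLinear (xs : List (List Int)) (key : List Int → List Int) :
    PySem.List.min? xs key
      = @PySem.List.min? (List Int) (List Int) List.instLinearOrder.toLT
          LinearOrder.toDecidableLT xs key := by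
  unfold PySem.List.min?
  apply PySem.List.foldl_congr_mem
  intro acc x _
  cases acc with
  | none => rfl
  | some mm =>
      show (if @LT.lt (List Int) List.instLT (key x) (key mm) then some x else some mm)
          = @ite _ (@LT.lt (List Int) List.instLinearOrder.toLT (key x) (key mm))
              (@LinearOrder.toDecidableLT (List Int) List.instLinearOrder (key x) (key mm))
              (some x) (some mm)
      exact @if_congr _ _ _ _ (@LinearOrder.toDecidableLT (List Int) List.instLinearOrder (key x) (key mm)) _ _ _ _ Iff.rfl rfl rfl

-- one narrowing step refines "agrees with m on the first k reversed entries" to k+1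
lemma narrow_step (set : List Int) (hn : 0 < set.length) (m : List Int)
    (hm : PySem.List.min? (rotsB set) (fun r => r.reverse) = some m) (k : Nat)
    (hk : k < set.length)
    (R : List (List Int)) (hRnodup : R.Nodup) (hRmem : ∀ x, x ∈ R ↔ x ∈ rotsB set) :
    narrowOnce (set.length : Int)
        (R.filter (fun s => decide (s.reverse.take k = m.reverse.take k))) (k : Int)
      = R.filter (fun s => decide (s.reverse.take (k+1) = m.reverse.take (k+1))) := by
  have hmB : m ∈ rotsB set := PySem.List.min?_mem hm
  have hml : m.length = set.length := length_of_mem_rotsB set m hmB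
  have hkm : k < m.reverse.length := by simpa [hml] using hk
  set P := R.filter (fun s => decide (s.reverse.take k = m.reverse.take k)) with hP
  have hPsub : ∀ s ∈ P, s ∈ rotsB set := fun s hs =>
    (hRmem s).1 (List.mem_filter.mp hs).1
  have hiv : ∀ s ∈ rotsB set, ∀ (hsk : k < s.reverse.length),
      ivfun (set.length : Int) (k : Int) s = s.reverse[k]'hsk := by
    intro s hs hsk
    have hsl : s.length = set.length := length_of_mem_rotsB set s hs
    have h := ival_eq s k (by omega) (by
        have := head_of_mem_rotsB set s hs hn
        exact this) (bounds_of_mem_rotsB set s hs)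
    rw [← hsl]
    exact h
  have hmP : m ∈ P := List.mem_filter.mpr ⟨(hRmem m).2 hmB, by simp⟩
  have hbnd : m.reverse[k]'hkm < 12 := by
    have : m.reverse[k]'hkm ∈ m := List.mem_reverse.mp (List.getElem_mem _)
    exact (bounds_of_mem_rotsB set m hmB _ this).2
  have hbest : P.foldl (fun b s => min b (ivfun (set.length : Int) (k : Int) s)) 1000
      = m.reverse[k]'hkm := by
    rw [← List.foldl_map (f := ivfun (set.length : Int) (k : Int)) (g := fun b v => min b v)]
    have hvm : m.reverse[k]'hkm ∈ P.map (ivfun (set.length : Int) (k : Int)) :=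
      List.mem_map.mpr ⟨m, hmP, hiv m hmB hkm⟩
    have hlow : ∀ v ∈ P.map (ivfun (set.length : Int) (k : Int)), m.reverse[k]'hkm ≤ v := by
      rintro v hv
      obtain ⟨s, hsP, rfl⟩ := List.mem_map.mp hv
      have hsB := hPsub s hsP
      have hsk : k < s.reverse.length := by
        simpa [length_of_mem_rotsB set s hsB] using hk
      rw [hiv s hsB hsk]
      have htk : m.reverse.take k = s.reverse.take k :=
        (of_decide_eq_true (List.mem_filter.mp hsP).2).symm
      have hm' : @PySem.List.min? (List Int) (List Int) List.instLinearOrder.toLT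
          LinearOrder.toDecidableLT (rotsB set) (fun r => r.reverse) = some m := by
        rw [← min?_toLinear]; exact hm
      have hmin : ∀ y ∈ rotsB set, m.reverse ≤ y.reverse :=
        PySem.List.min?_isMin (key := fun r : List Int => r.reverse) hm'
      exact getElem_le_of_le hkm hsk htk (hmin s hsB)
    have hub := (PySem.List.foldl_min_le (P.map (ivfun (set.length : Int) (k : Int))) 1000).2
      _ hvm
    rcases PySem.List.foldl_min_mem (P.map (ivfun (set.length : Int) (k : Int))) 1000 with
      he | hmem2
    · rw [he] at hub; omega
    · exact le_antisymm hub (hlow _ hmem2)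
  rw [narrowOnce_def, hbest]
  refine (filtFold (fun s => ivfun (set.length : Int) (k : Int) s = m.reverse[k]'hkm) P []
      (hRnodup.filter _) (by simp)).trans ?_
  rw [List.nil_append, hP, List.filter_filter]
  apply List.filter_congr
  intro s hsR
  have hsB := (hRmem s).1 hsR
  have hsl : s.length = set.length := length_of_mem_rotsB set s hsB
  have hsk : k < s.reverse.length := by simpa [hsl] using hk
  rw [hiv s hsB hsk, ← Bool.decide_and]
  apply decide_eq_decide.mpr
  constructor
  · rintro ⟨h1, h2⟩
    rw [List.take_add_one, List.take_add_one, h2,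
        List.getElem?_eq_getElem hsk, List.getElem?_eq_getElem hkm, h1]
  · intro h
    rw [List.take_add_one, List.take_add_one,
        List.getElem?_eq_getElem hsk, List.getElem?_eq_getElem hkm] at h
    have hlen : (s.reverse.take k).length = (m.reverse.take k).length := by
      simp [List.length_take]
      omega
    obtain ⟨h1, h2⟩ := List.append_inj h (by simpa using hlen)
    exact ⟨by simpa using h2, h1⟩

-- the invariant: after the intervals 0..k-1, A's candidate list is exactly the
-- rotations agreeing with the minimum m on the first k reversed entries
lemma pass_invariant (set : List Int) (hn : 0 < set.length) (m : List Int)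
    (hm : PySem.List.min? (rotsB set) (fun r => r.reverse) = some m) (k : Nat)
    (hk : k ≤ set.length) :
    (PySem.List.pyRange 0 (k : Int) 1).foldl (narrowOnce (set.length : Int))
        ((rotsB set).foldl (fun acc r => if r ∈ acc then acc else acc ++ [r]) [])
      = ((rotsB set).foldl (fun acc r => if r ∈ acc then acc else acc ++ [r]) []).filter
          (fun s => decide (s.reverse.take k = m.reverse.take k)) := by
  induction k with
  | zero =>
      rw [show ((0:Nat):Int) = 0 by simp, PySem.List.pyRange_one_eq_nil le_rfl]
      simp
  | succ k ih =>
      rw [show ((k+1:Nat):Int) = (k:Int) + 1 by push_cast; ring,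
          PySem.List.pyRange_one_succ_right (by positivity), List.foldl_append]
      rw [ih (by omega)]
      simp only [List.foldl_cons, List.foldl_nil]
      exact narrow_step set hn m hm k (by omega) _
        (nodup_dedupFold _ _ List.nodup_nil)
        (fun x => by rw [mem_dedupFold]; simp)

-- ===== VERDICT (by name: the statement is the Claim_ definition above) =====
theorem normal_order_spec : Claim_equal_normal_order := by
  intro set _ hpre
  have hn : 0 < set.length := List.length_pos_iff.mpr hpre
  show normal_order set = normal_order_alt set
  -- B's value
  obtain ⟨m, hm⟩ : ∃ m, PySem.List.min? (rotsB set) (fun r => r.reverse) = some m := by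
    cases h : PySem.List.min? (rotsB set) (fun r => r.reverse) with
    | none =>
        exfalso
        have hnil := (PySem.List.min?_eq_none_iff _ _).mp h
        have hlen : (rotsB set).length = set.length := by
          simp [rotsB, PySem.List.length_pyRange_one]
        rw [hnil] at hlen
        simp at hlen
        omega
    | some m => exact ⟨m, rfl⟩
  have hB : normal_order_alt set = m := by
    rw [show normal_order_alt set
        = (PySem.List.min? (rotsB set) (fun r => r.reverse)).getD [] from rfl, hm]
    rfl
  -- A's value
  have hmB : m ∈ rotsB set := PySem.List.min?_mem hm
  have hml : m.length = set.length := length_of_mem_rotsB set m hmB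
  have hR := pass_invariant set hn m hm set.length le_rfl
  have hfin : ((rotsB set).foldl (fun acc r => if r ∈ acc then acc else acc ++ [r]) []).filter
      (fun s => decide (s.reverse.take set.length = m.reverse.take set.length)) = [m] := by
    have hRmem : ∀ x, x ∈ (rotsB set).foldl
        (fun acc r => if r ∈ acc then acc else acc ++ [r]) [] ↔ x ∈ rotsB set :=
      fun x => by rw [mem_dedupFold]; simp
    have hRnodup := nodup_dedupFold (rotsB set) [] List.nodup_nil
    rw [List.filter_congr (q := fun s => s == m) ?_]
    · rw [List.filter_beq, List.count_eq_one_of_mem hRnodup ((hRmem m).2 hmB),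
          List.replicate_one]
    · intro s hs
      have hsl : s.length = set.length := length_of_mem_rotsB set s ((hRmem s).1 hs)
      have h1 : s.reverse.take set.length = s.reverse :=
        List.take_of_length_le (by simp [hsl])
      have h2 : m.reverse.take set.length = m.reverse :=
        List.take_of_length_le (by simp [hml])
      rw [h1, h2]
      by_cases he : s = m
      · subst he; simp
      · simp [List.reverse_inj, he]
  rw [hfin] at hR
  show whileTrue 1 (PySem.List.len set) (get_all_rotations set) = normal_order_alt set
  rw [hB]
  simp only [whileTrue, PySem.List.len_eq, get_all_rotations_eq]
  rw [hR]
  rfl
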